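-- pv_equiv track=rewrite | github.com/MrBrantCode/unitest_baseline | mut_generate/mist_train_taco/taco_10345/solution.py | count_plaque_arrangements
-- ===== SOURCE A (Python) =====
-- def count_plaque_arrangements(n: int, k: int) -> int:
--     """
--     Calculate the number of ways to write the numbers on the houses' plaques
--     such that the conditions specified in the problem are met, modulo 10^9 + 7.
--
--     Parameters:
--     n (int): The number of houses.
--     k (int): The parameter k from the problem statement.
--
--     Returns:
--     int: The number of valid arrangements modulo 10^9 + 7.
--     """
--     mod = 10**9 + 7
--     ans = 1
--
--     # Calculate the number of ways for the first k houses
--     for i in range(1, k):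
--         ans = ans * k % mod
--
--     # Calculate the number of ways for the remaining houses
--     for _ in range(n - k):
--         ans = ans * (n - k) % mod
--
--     return ans
-- ===== SOURCE B (Python) =====
-- def count_plaque_arrangements(n: int, k: int) -> int:
--     mod = 10**9 + 7
--     return pow(k, max(k - 1, 0), mod) * pow(n - k, max(n - k, 0), mod) % mod
-- ===== Notes on version B (the rewrite author's own statement) =====
-- stated objective: faster
-- what changed: Replaces the two O(n) repeated-multiplication loops by two modular exponentiations pow(base, exp, mod), computing k^(k-1)*(n-k)^(n-k) mod 1e9+7 in closed form.
import Mathlib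
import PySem

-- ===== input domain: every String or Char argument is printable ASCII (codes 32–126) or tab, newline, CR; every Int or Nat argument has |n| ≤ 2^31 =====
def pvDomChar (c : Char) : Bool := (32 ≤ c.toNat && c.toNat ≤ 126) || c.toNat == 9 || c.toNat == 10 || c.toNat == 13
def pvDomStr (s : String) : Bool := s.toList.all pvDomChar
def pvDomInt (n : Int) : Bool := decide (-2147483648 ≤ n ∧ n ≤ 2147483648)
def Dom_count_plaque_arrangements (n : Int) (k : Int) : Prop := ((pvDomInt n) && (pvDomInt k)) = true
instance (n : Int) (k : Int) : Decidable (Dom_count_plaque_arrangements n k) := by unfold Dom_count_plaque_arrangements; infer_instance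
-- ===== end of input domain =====

-- B replaces the two O(n) repeated-multiplication loops by two closed-form modular exponentiations (faster, asymptotic).

-- ===== PORT A =====
def count_plaque_arrangements (n : Int) (k : Int) : Int :=
  let m : Int := 10 ^ 9 + 7
  -- for i in range(1, k): ans = ans * k % mod
  let ans : Int := (PySem.List.pyRange 1 k 1).foldl (fun a _ => PySem.Int.mod (a * k) m) 1
  -- for _ in range(n - k): ans = ans * (n - k) % mod
  (PySem.List.pyRange 0 (n - k) 1).foldl (fun a _ => PySem.Int.mod (a * (n - k)) m) ans

-- ===== PORT B =====
-- Python's builtin pow(b, e, m) for e ≥ 0, m > 0 (result normalized into [0, m))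
def pvPow (b : Int) (e : Int) (m : Int) : Int := PySem.Int.mod (b ^ e.toNat) m

def count_plaque_arrangements_alt (n : Int) (k : Int) : Int :=
  let m : Int := 10 ^ 9 + 7
  PySem.Int.mod (pvPow k (max (k - 1) 0) m * pvPow (n - k) (max (n - k) 0) m) m

-- ===== PRECONDITION & SPEC =====
def Spec_count_plaque_arrangements (n : Int) (k : Int) (out : Int) : Prop := out = count_plaque_arrangements_alt n k
instance (n : Int) (k : Int) (out : Int) : Decidable (Spec_count_plaque_arrangements n k out) := by unfold Spec_count_plaque_arrangements; infer_instance

-- ===== CLAIM (what is proved, stated in full; the proofs are below) =====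
def Claim_equal_count_plaque_arrangements : Prop := ∀ (n : Int) (k : Int), Dom_count_plaque_arrangements n k → Spec_count_plaque_arrangements n k (count_plaque_arrangements n k)

-- ===== LEMMAS AND PROOFS =====

-- Folding 'a ↦ a*c % m' over a nonempty list of length L yields init * c^L % m.
theorem pv_fold_mod {α : Type} (c m : Int) :
    ∀ (l : List α) (init : Int), l ≠ [] →
      l.foldl (fun a _ => a * c % m) init = init * c ^ l.length % m := by
  intro l
  induction l with
  | nil => intro _ h; exact absurd rfl h
  | cons x xs ih =>
    intro init _
    cases xs with
    | nil => simp
    | cons y ys =>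
        rw [List.foldl_cons, ih (init * c % m) (by simp)]
        rw [Int.mul_emod, Int.emod_emod_of_dvd _ dvd_rfl, ← Int.mul_emod]
        congr 1
        simp [pow_succ]
        ring

theorem pv_len_range1 (k : Int) : (PySem.List.pyRange 1 k 1).length = (k - 1).toNat := by
  simp [PySem.List.length_pyRange_one]

theorem pv_len_range0 (c : Int) : (PySem.List.pyRange 0 c 1).length = c.toNat := by
  simp [PySem.List.length_pyRange_one]

theorem pv_ne_nil_range1 (k : Int) (h : 1 < k) : PySem.List.pyRange 1 k 1 ≠ [] := by
  rw [Ne, ← List.length_eq_zero_iff, pv_len_range1]; omega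

theorem pv_ne_nil_range0 (c : Int) (h : 0 < c) : PySem.List.pyRange 0 c 1 ≠ [] := by
  rw [Ne, ← List.length_eq_zero_iff, pv_len_range0]; omega

-- ===== VERDICT (by name: the statement is the Claim_ definition above) =====
theorem count_plaque_arrangements_spec : Claim_equal_count_plaque_arrangements := by
  intro n k _
  unfold Spec_count_plaque_arrangements count_plaque_arrangements count_plaque_arrangements_alt pvPow
  have hm : (0 : Int) < 10 ^ 9 + 7 := by norm_num
  set m : Int := 10 ^ 9 + 7 with hmdef
  have h1m : (1 : Int) % m = 1 := Int.emod_eq_of_lt (by norm_num) (by rw [hmdef]; norm_num)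
  have hmax1 : (max (k - 1) 0).toNat = (k - 1).toNat := by omega
  have hmax2 : (max (n - k) 0).toNat = (n - k).toNat := by omega
  simp only [PySem.Int.mod_eq_emod_of_pos hm, hmax1, hmax2]
  by_cases h1 : k ≤ 1
  · have e1 : (k - 1).toNat = 0 := by omega
    rw [PySem.List.pyRange_one_eq_nil h1]
    by_cases h2 : n - k ≤ 0
    · have e2 : (n - k).toNat = 0 := by omega
      rw [PySem.List.pyRange_one_eq_nil h2]
      simp [e1, e2, h1m]
    · rw [pv_fold_mod (n - k) m _ _ (pv_ne_nil_range0 (n - k) (by omega)), pv_len_range0]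
      rw [e1]
      simp [h1m]
  · rw [pv_fold_mod k m _ 1 (pv_ne_nil_range1 k (by omega)), pv_len_range1, one_mul]
    by_cases h2 : n - k ≤ 0
    · have e2 : (n - k).toNat = 0 := by omega
      rw [PySem.List.pyRange_one_eq_nil h2]
      simp [e2, h1m]
    · rw [pv_fold_mod (n - k) m _ _ (pv_ne_nil_range0 (n - k) (by omega)), pv_len_range0]
      conv_lhs => rw [Int.mul_emod]
      rw [Int.emod_emod_of_dvd _ dvd_rfl]
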